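-- pv_equiv track=rewrite | github.com/sangmin213/BOJ | 17140_Gold4.py | r_op
-- ===== SOURCE A (Python) =====
-- def r_op(matrix):
--     new_matrix = []
--     for row in matrix:
--         item2cnt, cnt2item = {}, {}
--         for ele in row:
--             if ele == 0:
--                 continue
--             if ele in item2cnt.keys(): item2cnt[ele] += 1
--             else:   item2cnt[ele] = 1 # item 개수 저장
--
--             if item2cnt[ele] in cnt2item.keys(): cnt2item[item2cnt[ele]].append(ele)
--             else:   cnt2item[item2cnt[ele]] = [ele] # 각 개수별 item 저장
--
--             if item2cnt[ele] > 1: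
--                 cnt2item[item2cnt[ele] - 1].remove(ele) # 이전 개수에 있던 item 삭제
--         new_row = []
--         for cnt in sorted(cnt2item):
--             tmp = sorted(cnt2item[cnt])
--             for ele in tmp:
--                 new_row += [ele, cnt]
--         new_matrix.append(new_row)
--
--     max_len = 0
--     for row in new_matrix:
--         if len(row) > max_len:  max_len = len(row)
--
--     for row in new_matrix:
--         row += [0 for i in range(max_len - len(row))]
--
--     return new_matrix
-- ===== SOURCE B (Python) =====
-- def _runs(vals):
--     # vals is sorted; produce (value, run-length) for each maximal run
--     if not vals:
--         return []
--     v = vals[0]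
--     rest = vals[1:]
--     k = 0
--     while k < len(rest) and rest[k] == v:
--         k += 1
--     return [(v, k + 1)] + _runs(rest[k:])
--
--
-- def _row(row):
--     vals = sorted(x for x in row if x != 0)
--     pairs = _runs(vals)
--     pairs.sort(key=lambda p: (p[1], p[0]))
--     return [x for p in pairs for x in p]
--
--
-- def r_op(matrix):
--     rows = [_row(row) for row in matrix]
--     width = max((len(r) for r in rows), default=0)
--     return [r + [0] * (width - len(r)) for r in rows]
-- ===== Notes on version B (the rewrite author's own statement) =====
-- stated objective: alternative
-- what changed: Replaces A's incremental two-dict bookkeeping (value->count tallying plus a count->values bucket dict maintained with append/remove per element) by sorting each row's nonzero values once, counting runs of equal values by recursive run-grouping, and stably sorting the (value,count) pairs by (count,value).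
import Mathlib
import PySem

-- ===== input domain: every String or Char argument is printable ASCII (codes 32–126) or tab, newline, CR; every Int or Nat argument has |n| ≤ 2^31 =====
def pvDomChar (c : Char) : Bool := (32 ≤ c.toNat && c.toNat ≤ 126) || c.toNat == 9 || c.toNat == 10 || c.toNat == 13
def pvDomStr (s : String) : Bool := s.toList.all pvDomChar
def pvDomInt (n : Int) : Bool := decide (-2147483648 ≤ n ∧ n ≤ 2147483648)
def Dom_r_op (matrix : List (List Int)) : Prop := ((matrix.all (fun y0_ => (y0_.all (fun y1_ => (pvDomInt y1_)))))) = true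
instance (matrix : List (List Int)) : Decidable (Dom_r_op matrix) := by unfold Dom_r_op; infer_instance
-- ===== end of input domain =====

-- B replaces A's incremental two-dict (value→count, count→values) bookkeeping by sort-then-group-runs
-- counting plus one stable sort of the (value, count) pairs; equivalence of the RETURN values is proved
-- (A only mutates lists it created itself, so there is no caller-visible side effect).

-- ===== PORT A =====
-- per-row body of A's loop: the two dicts item2cnt / cnt2item, then the sorted emission
def rowNewA (row : List Int) : List Int :=
  let st := row.foldl
    (fun (st : PySem.Dict Int Int × PySem.Dict Int (List Int)) ele =>
      if ele = 0 then st
      else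
        let i2 := if st.1.contains ele then st.1.insert ele (st.1.getD ele 0 + 1)
                  else st.1.insert ele 1
        let c := i2.getD ele 0
        let c2 := if st.2.contains c then st.2.insert c (st.2.getD c [] ++ [ele])
                  else st.2.insert c [ele]
        let c2 := if c > 1 then
            -- cnt2item[c-1].remove(ele); the remove never fails (ele was stored there)
            let prev := c2.getD (c - 1) []
            c2.insert (c - 1) ((PySem.List.remove? prev ele).getD prev)
          else c2
        (i2, c2))
    (PySem.Dict.empty, PySem.Dict.empty)
  (PySem.List.sorted st.2.keys (fun x => x) false).foldl
    (fun new_row cnt =>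
      (PySem.List.sorted (st.2.getD cnt []) (fun x => x) false).foldl
        (fun nr ele => nr ++ [ele, cnt]) new_row)
    []

def r_op (matrix : List (List Int)) : List (List Int) :=
  let new_matrix := matrix.foldl (fun nm row => nm ++ [rowNewA row]) []
  let max_len := new_matrix.foldl
    (fun m row => if PySem.List.len row > m then PySem.List.len row else m) 0
  -- 'row += [0]*(max_len-len(row))' extends each (freshly built) row in place; the returned
  -- list is new_matrix with every row so extended, i.e. this map
  new_matrix.map (fun row =>
    row ++ (PySem.List.pyRange 0 (max_len - PySem.List.len row) 1).map (fun _ => (0 : Int)))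

-- ===== PORT B =====
-- _runs: the inner while loop counts the leading run (takeWhile length), rest[k:] is the dropWhile
def pvRuns (vals : List Int) : List (Int × Int) :=
  match vals with
  | [] => []
  | v :: rest =>
      (v, ((rest.takeWhile (fun x => x == v)).length : Int) + 1)
        :: pvRuns (rest.dropWhile (fun x => x == v))
termination_by vals.length
decreasing_by
  simp only [List.length_cons]
  exact Nat.lt_succ_of_le (List.length_dropWhile_le _ _)

def rowNewB (row : List Int) : List Int :=
  let vals := PySem.List.sorted (row.filter (fun x => x ≠ 0)) (fun x => x) false
  let pairs := PySem.List.sorted2 (pvRuns vals) (fun p => p.2) (fun p => p.1) false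
  pairs.flatMap (fun p => [p.1, p.2])

def r_op_alt (matrix : List (List Int)) : List (List Int) :=
  let rows := matrix.map rowNewB
  let width := PySem.List.maxD (rows.map (fun r => PySem.List.len r)) (fun x => x) 0
  rows.map (fun r => r ++ PySem.List.pyRepeat [(0 : Int)] (width - PySem.List.len r))

-- ===== PRECONDITION & SPEC =====
def Spec_r_op (matrix : List (List Int)) (out : List (List Int)) : Prop := out = r_op_alt matrix
instance (matrix : List (List Int)) (out : List (List Int)) : Decidable (Spec_r_op matrix out) := by unfold Spec_r_op; infer_instance

-- ===== CLAIM (what is proved, stated in full; the proofs are below) =====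
def Claim_equal_r_op : Prop := ∀ (matrix : List (List Int)), Dom_r_op matrix → Spec_r_op matrix (r_op matrix)

-- ===== LEMMAS AND PROOFS =====

-- A's per-element dict update (proof-side name for the nonzero branch of A's loop body)
def stepA (st : PySem.Dict Int Int × PySem.Dict Int (List Int)) (ele : Int) :
    PySem.Dict Int Int × PySem.Dict Int (List Int) :=
  let i2 := if st.1.contains ele then st.1.insert ele (st.1.getD ele 0 + 1)
            else st.1.insert ele 1
  let c := i2.getD ele 0
  let c2 := if st.2.contains c then st.2.insert c (st.2.getD c [] ++ [ele])
            else st.2.insert c [ele]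
  let c2 := if c > 1 then
      let prev := c2.getD (c - 1) []
      c2.insert (c - 1) ((PySem.List.remove? prev ele).getD prev)
    else c2
  (i2, c2)

-- canonical per-row data (proof-side only)
def cntsMax (p : List Int) : Nat := (p.map (fun v => p.count v)).foldl max 0

def dvals (p : List Int) : List Int := PySem.List.sorted (PySem.List.dedup p) (fun x => x) false

def dcl (p : List Int) (c : Nat) : List Int := (dvals p).filter (fun v => p.count v == c)

def canonPairs (p : List Int) : List (Int × Int) :=
  (List.range (cntsMax p)).flatMap (fun i => (dcl p (i + 1)).map (fun v => (v, ((i : Int) + 1))))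

-- the loop invariant of A's per-row dict fold, after having consumed the (nonzero) elements q
def InvA (q : List Int) (i2 : PySem.Dict Int Int) (c2 : PySem.Dict Int (List Int)) : Prop :=
  (∀ v, i2.getD v 0 = (q.count v : Int)) ∧
  c2.keys.Nodup ∧
  (∀ c : Int, c2.contains c = true ↔ 1 ≤ c ∧ ∃ v ∈ q, c ≤ (q.count v : Int)) ∧
  (∀ c : Int, (c2.getD c []).Nodup) ∧
  (∀ (c : Int) (v : Int), v ∈ c2.getD c [] ↔ v ∈ q ∧ (q.count v : Int) = c)

theorem invA_empty : InvA [] PySem.Dict.empty PySem.Dict.empty := by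
  refine ⟨?_, ?_, ?_, ?_, ?_⟩ <;>
    simp [PySem.Dict.getD_empty, PySem.Dict.keys_empty, PySem.Dict.contains_empty]

theorem invA_step (q : List Int) (st : PySem.Dict Int Int × PySem.Dict Int (List Int))
    (h : InvA q st.1 st.2) (ele : Int) :
    InvA (q ++ [ele]) (stepA st ele).1 (stepA st ele).2 := by
  obtain ⟨h1, h2, h3, h4, h5⟩ := h
  have hcm : ∀ v ∈ q, 1 ≤ q.count v := fun v hv => List.count_pos_iff.mpr hv
  have hcnt : ∀ v : Int, ((q ++ [ele]).count v : Int)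
      = if v = ele then (q.count ele : Int) + 1 else (q.count v : Int) := by
    intro v
    by_cases hv : v = ele
    · subst hv; simp [List.count_append]
    · have h0 : List.count v [ele] = 0 := List.count_eq_zero.mpr (by simp [hv])
      simp [hv, List.count_append, h0]
  have hmem' : ∀ v : Int, v ∈ q ++ [ele] ↔ v ∈ q ∨ v = ele := by
    intro v; simp
  have hi2 : (if st.1.contains ele then st.1.insert ele (st.1.getD ele 0 + 1)
      else st.1.insert ele 1) = st.1.insert ele ((q.count ele : Int) + 1) := by
    split_ifs with hc
    · rw [h1]
    · have h0 : st.1.getD ele 0 = 0 :=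
        PySem.Dict.getD_of_not_contains _ _ (by simpa using hc)
      have he : ((q.count ele : Int)) = 0 := by rw [← h1 ele, h0]
      rw [he]; norm_num
  simp only [stepA, hi2, PySem.Dict.getD_insert_self]
  set C : Int := (q.count ele : Int) + 1 with hC
  have hC1 : 1 ≤ C := by omega
  have hce : ((q ++ [ele]).count ele : Int) = C := by rw [hcnt]; simp
  -- first cnt2item insert, normalized
  have hc2a : (if st.2.contains C then st.2.insert C (st.2.getD C [] ++ [ele])
      else st.2.insert C [ele]) = st.2.insert C (st.2.getD C [] ++ [ele]) := by
    split_ifs with hc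
    · rfl
    · rw [PySem.Dict.getD_of_not_contains _ _ (by simpa using hc)]; simp
  rw [hc2a]
  have hele_notin : ele ∉ st.2.getD C [] := by
    intro hmem
    have := (h5 C ele).mp hmem
    omega
  rcases Nat.eq_zero_or_pos (q.count ele) with hn0 | hnpos
  · -- ele not seen before: count goes to 1, no removal
    have hnotmem : ele ∉ q := by
      intro hv; have := hcm ele hv; omega
    have hgt : ¬ C > 1 := by omega
    rw [if_neg hgt]
    refine ⟨?_, ?_, ?_, ?_, ?_⟩
    · intro v
      rw [PySem.Dict.getD_insert, hcnt v]
      split_ifs with hv <;> simp [h1]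
    · exact PySem.Dict.nodup_keys_insert _ _ _ h2
    · intro k
      rw [PySem.Dict.contains_insert]
      constructor
      · intro hk
        rcases Bool.or_eq_true_iff.mp hk with hk | hk
        · have hkC : k = C := by simpa using hk
          subst hkC
          refine ⟨hC1, ele, (hmem' ele).mpr (Or.inr rfl), ?_⟩
          rw [hce]
        · obtain ⟨hk1, v, hv, hkv⟩ := (h3 k).mp hk
          refine ⟨hk1, v, (hmem' v).mpr (Or.inl hv), ?_⟩
          rw [hcnt]
          split_ifs with hve
          · subst hve; omega
          · exact hkv
      · rintro ⟨hk1, v, hv, hkv⟩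
        rcases (hmem' v).mp hv with hv | hv
        · rw [hcnt] at hkv
          split_ifs at hkv with hve
          · exact absurd hv (by rw [hve]; exact hnotmem)
          · exact Bool.or_eq_true_iff.mpr (Or.inr ((h3 k).mpr ⟨hk1, v, hv, hkv⟩))
        · rw [hv, hce] at hkv
          have : k = C := by omega
          simp [this]
    · intro k
      rw [PySem.Dict.getD_insert]
      split_ifs with hk
      · subst hk
        refine List.Nodup.append (h4 C) (by simp) ?_
        intro a ha hb
        simp only [List.mem_singleton] at hb
        subst hb; exact hele_notin ha
      · exact h4 k
    · intro k v
      rw [PySem.Dict.getD_insert]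
      split_ifs with hk
      · constructor
        · intro hv
          rcases List.mem_append.mp hv with hv | hv
          · obtain ⟨hvq, hvc⟩ := (h5 C v).mp hv
            have hvne : v ≠ ele := fun he => hnotmem (he ▸ hvq)
            exact ⟨(hmem' v).mpr (Or.inl hvq), by rw [hcnt v, if_neg hvne, hvc, hk]⟩
          · have hv : v = ele := by simpa using hv
            exact ⟨(hmem' v).mpr (Or.inr hv), by rw [hv, hce, hk]⟩
        · rintro ⟨hv, hvc⟩
          rw [hcnt v] at hvc
          split_ifs at hvc with hve
          · exact List.mem_append.mpr (Or.inr (by simp [hve]))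
          · rcases (hmem' v).mp hv with hv | hv
            · exact List.mem_append.mpr (Or.inl ((h5 C v).mpr ⟨hv, by rw [hvc, hk]⟩))
            · exact absurd hv hve
      · constructor
        · intro hv
          obtain ⟨hvq, hvc⟩ := (h5 k v).mp hv
          have hvne : v ≠ ele := fun he => hnotmem (he ▸ hvq)
          exact ⟨(hmem' v).mpr (Or.inl hvq), by rw [hcnt v, if_neg hvne, hvc]⟩
        · rintro ⟨hv, hvc⟩
          rw [hcnt v] at hvc
          split_ifs at hvc with hve
          · exact absurd hvc.symm hk
          · rcases (hmem' v).mp hv with hv | hv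
            · exact (h5 k v).mpr ⟨hv, hvc⟩
            · exact absurd hv hve
  · -- ele seen before: count goes from n to n+1, remove from the old bucket
    have hmele : ele ∈ q := List.count_pos_iff.mp hnpos
    have hgt : C > 1 := by omega
    rw [if_pos hgt]
    have hCne : C - 1 ≠ C := by omega
    have hprev : (st.2.insert C (st.2.getD C [] ++ [ele])).getD (C - 1) []
        = st.2.getD (C - 1) [] := by
      rw [PySem.Dict.getD_insert, if_neg hCne]
    rw [hprev]
    have hele_in_prev : ele ∈ st.2.getD (C - 1) [] := by
      rw [h5]; exact ⟨hmele, by omega⟩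
    rw [PySem.List.remove?_eq_some_erase _ _ hele_in_prev]
    simp only [Option.getD_some]
    refine ⟨?_, ?_, ?_, ?_, ?_⟩
    · intro v
      rw [PySem.Dict.getD_insert, hcnt v]
      split_ifs with hv <;> simp [h1]
    · exact PySem.Dict.nodup_keys_insert _ _ _ (PySem.Dict.nodup_keys_insert _ _ _ h2)
    · intro k
      rw [PySem.Dict.contains_insert, PySem.Dict.contains_insert]
      constructor
      · intro hk
        rcases Bool.or_eq_true_iff.mp hk with hk | hk
        · have hkC : k = C - 1 := by simpa using hk
          subst hkC
          refine ⟨by omega, ele, (hmem' ele).mpr (Or.inr rfl), ?_⟩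
          rw [hce]; omega
        rcases Bool.or_eq_true_iff.mp hk with hk | hk
        · have hkC : k = C := by simpa using hk
          subst hkC
          refine ⟨hC1, ele, (hmem' ele).mpr (Or.inr rfl), ?_⟩
          rw [hce]
        · obtain ⟨hk1, v, hv, hkv⟩ := (h3 k).mp hk
          refine ⟨hk1, v, (hmem' v).mpr (Or.inl hv), ?_⟩
          rw [hcnt]
          split_ifs with hve
          · rw [hve] at hkv; omega
          · exact hkv
      · rintro ⟨hk1, v, hv, hkv⟩
        rcases (hmem' v).mp hv with hv | hv
        · rw [hcnt] at hkv
          split_ifs at hkv with hve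
          · by_cases hkC : k = C
            · simp [hkC]
            · have : k ≤ (q.count ele : Int) := by omega
              exact Bool.or_eq_true_iff.mpr (Or.inr (Bool.or_eq_true_iff.mpr
                (Or.inr ((h3 k).mpr ⟨hk1, ele, hmele, this⟩))))
          · exact Bool.or_eq_true_iff.mpr (Or.inr (Bool.or_eq_true_iff.mpr
              (Or.inr ((h3 k).mpr ⟨hk1, v, hv, hkv⟩))))
        · rw [hv, hce] at hkv
          by_cases hkC : k = C
          · simp [hkC]
          · have : k ≤ (q.count ele : Int) := by omega
            exact Bool.or_eq_true_iff.mpr (Or.inr (Bool.or_eq_true_iff.mpr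
              (Or.inr ((h3 k).mpr ⟨hk1, ele, hmele, this⟩))))
    · intro k
      rw [PySem.Dict.getD_insert, PySem.Dict.getD_insert]
      split_ifs with hk hk'
      · exact List.Nodup.erase _ (h4 (C - 1))
      · subst hk'
        refine List.Nodup.append (h4 C) (by simp) ?_
        intro a ha hb
        simp only [List.mem_singleton] at hb
        subst hb; exact hele_notin ha
      · exact h4 k
    · intro k v
      rw [PySem.Dict.getD_insert, PySem.Dict.getD_insert]
      split_ifs with hk hk'
      · rw [List.Nodup.mem_erase_iff (h4 (C - 1))]
        constructor
        · rintro ⟨hvne, hv⟩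
          obtain ⟨hvq, hvc⟩ := (h5 (C - 1) v).mp hv
          exact ⟨(hmem' v).mpr (Or.inl hvq), by rw [hcnt v, if_neg hvne, hvc, hk]⟩
        · rintro ⟨hv, hvc⟩
          rw [hcnt v] at hvc
          split_ifs at hvc with hve
          · exfalso; rw [hk] at hvc; omega
          · rcases (hmem' v).mp hv with hv | hv
            · exact ⟨hve, (h5 (C - 1) v).mpr ⟨hv, by rw [hvc, hk]⟩⟩
            · exact absurd hv hve
      · constructor
        · intro hv
          rcases List.mem_append.mp hv with hv | hv
          · obtain ⟨hvq, hvc⟩ := (h5 C v).mp hv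
            have hvne : v ≠ ele := by intro he; rw [he] at hvc; omega
            exact ⟨(hmem' v).mpr (Or.inl hvq), by rw [hcnt v, if_neg hvne, hvc, hk']⟩
          · have hv : v = ele := by simpa using hv
            exact ⟨(hmem' v).mpr (Or.inr hv), by rw [hv, hce, hk']⟩
        · rintro ⟨hv, hvc⟩
          rw [hcnt v] at hvc
          split_ifs at hvc with hve
          · exact List.mem_append.mpr (Or.inr (by simp [hve]))
          · rcases (hmem' v).mp hv with hv | hv
            · exact List.mem_append.mpr (Or.inl ((h5 C v).mpr ⟨hv, by rw [hvc, hk']⟩))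
            · exact absurd hv hve
      · constructor
        · intro hv
          obtain ⟨hvq, hvc⟩ := (h5 k v).mp hv
          have hvne : v ≠ ele := by intro he; rw [he] at hvc; omega
          exact ⟨(hmem' v).mpr (Or.inl hvq), by rw [hcnt v, if_neg hvne, hvc]⟩
        · rintro ⟨hv, hvc⟩
          rw [hcnt v] at hvc
          split_ifs at hvc with hve
          · exact absurd hvc.symm hk'
          · rcases (hmem' v).mp hv with hv | hv
            · exact (h5 k v).mpr ⟨hv, hvc⟩
            · exact absurd hv hve


theorem invA_foldl (l : List Int) (q : List Int)
    (st : PySem.Dict Int Int × PySem.Dict Int (List Int)) (h : InvA q st.1 st.2) :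
    InvA (q ++ l) (l.foldl stepA st).1 (l.foldl stepA st).2 := by
  induction l generalizing q st with
  | nil => simpa using h
  | cons x xs ih =>
      have := ih (q ++ [x]) (stepA st x) (invA_step q st h x)
      simpa [List.append_assoc] using this

theorem pvRuns_char (l : List Int) (hs : l.Pairwise (fun a b => a ≤ b)) :
    (pvRuns l).Pairwise (fun a b => a.1 < b.1) ∧
    (∀ a b : Int, (a, b) ∈ pvRuns l ↔ a ∈ l ∧ b = (l.count a : Int)) := by
  induction l using pvRuns.induct with
  | case1 => simp [pvRuns]
  | case2 v rest ih =>
    obtain ⟨hv, hrs⟩ := List.pairwise_cons.mp hs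
    set t := rest.takeWhile (fun x => x == v) with ht
    set d := rest.dropWhile (fun x => x == v) with hd
    have htd : t ++ d = rest := List.takeWhile_append_dropWhile
    have hts : ∀ x ∈ t, x = v := fun x hx => by simpa using List.mem_takeWhile_imp hx
    have hdrest : ∀ x ∈ d, x ∈ rest := fun x hx => (List.dropWhile_sublist _).mem hx
    have hds : d.Pairwise (fun a b => a ≤ b) := List.Pairwise.sublist (List.dropWhile_sublist _) hrs
    have hvd : ∀ x ∈ d, v < x := by
      cases hD : d with
      | nil => simp
      | cons hh tt =>
        have hhead : (hh == v) = false := by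
          have := List.head?_dropWhile_not (fun x => x == v) rest
          rw [← hd, hD] at this; simpa using this
        have hhne : hh ≠ v := by simpa using hhead
        have hhge : v ≤ hh := hv hh (hdrest hh (by rw [hD]; simp))
        have hhgt : v < hh := lt_of_le_of_ne hhge (Ne.symm hhne)
        intro x hx
        have hds2 := hds
        rw [hD] at hds2
        rcases List.mem_cons.mp hx with hx | hx
        · rw [hx]; exact hhgt
        · have : hh ≤ x := (List.pairwise_cons.mp hds2).1 x hx
          omega
    have hvnd : v ∉ d := fun hmem => lt_irrefl v (hvd v hmem)
    have hcv : (v :: rest).count v = t.length + 1 := by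
      have h1 : t.count v = t.length := List.count_eq_length.mpr (fun b hb => (hts b hb).symm)
      have h2 : d.count v = 0 := List.count_eq_zero.mpr hvnd
      rw [List.count_cons_self, ← htd, List.count_append, h1, h2]
    have hdx : ∀ x ∈ d, (v :: rest).count x = d.count x := by
      intro x hx
      have hxv : x ≠ v := fun he => hvnd (he ▸ hx)
      have h1 : t.count x = 0 := List.count_eq_zero.mpr (fun hm => hxv (hts x hm))
      rw [← htd, List.count_cons, List.count_append, h1]
      simp [Ne.symm hxv]
    obtain ⟨ihp, ihm⟩ := ih hds
    constructor
    · rw [pvRuns]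
      refine List.pairwise_cons.mpr ⟨?_, ihp⟩
      rintro ⟨a, b⟩ hab
      have := (ihm a b).mp hab
      exact hvd a this.1
    · intro a b
      rw [pvRuns]
      simp only [List.mem_cons, Prod.mk.injEq]
      constructor
      · rintro (⟨ha, hb⟩ | hab)
        · refine ⟨Or.inl ha, ?_⟩
          rw [ha, hcv, hb]; push_cast; ring
        · obtain ⟨had, hbc⟩ := (ihm a b).mp hab
          exact ⟨Or.inr (hdrest a had), by rw [hbc, hdx a had]⟩
      · rintro ⟨ha, hb⟩
        by_cases hav : a = v
        · left
          refine ⟨hav, ?_⟩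
          rw [hb, hav, hcv]; push_cast; ring
        · right
          rcases ha with h | h
          · exact absurd h hav
          · have had : a ∈ d := by
              rcases List.mem_append.mp (htd ▸ h) with h' | h'
              · exact absurd (hts a h') hav
              · exact h'
            exact (ihm a b).mpr ⟨had, by rw [hb, hdx a had]⟩

theorem count_le_cntsMax (p : List Int) (v : Int) (hv : v ∈ p) : p.count v ≤ cntsMax p := by
  have := (PySem.List.le_foldl_max (p.map (fun v => p.count v)) 0).2
  exact this _ (List.mem_map.mpr ⟨v, hv, rfl⟩)

theorem cntsMax_mem (p : List Int) (h : 1 ≤ cntsMax p) : ∃ v ∈ p, p.count v = cntsMax p := by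
  rcases PySem.List.foldl_max_mem (p.map (fun v => p.count v)) 0 with h0 | hm
  · unfold cntsMax at h ⊢; omega
  · obtain ⟨v, hv, hveq⟩ := List.mem_map.mp hm
    exact ⟨v, hv, hveq⟩

theorem dvals_pairwise_lt (p : List Int) : (dvals p).Pairwise (fun a b => a < b) := by
  unfold dvals
  rw [PySem.List.dedup_eq_ofList]
  exact PySem.List.sorted_ofList_pairwise_lt p

theorem mem_dvals (p : List Int) (v : Int) : v ∈ dvals p ↔ v ∈ p := by
  unfold dvals
  rw [PySem.List.mem_sorted, PySem.List.mem_dedup]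

theorem mem_dcl (p : List Int) (c : Nat) (v : Int) :
    v ∈ dcl p c ↔ v ∈ p ∧ p.count v = c := by
  unfold dcl
  rw [List.mem_filter, mem_dvals]
  simp

theorem dcl_pairwise_lt (p : List Int) (c : Nat) : (dcl p c).Pairwise (fun a b => a < b) :=
  (dvals_pairwise_lt p).filter _

theorem canonPairs_mem (p : List Int) (pr : Int × Int) :
    pr ∈ canonPairs p ↔ pr.1 ∈ p ∧ pr.2 = (p.count pr.1 : Int) := by
  unfold canonPairs
  rw [List.mem_flatMap]
  constructor
  · rintro ⟨i, hi, hpr⟩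
    obtain ⟨v, hv, hveq⟩ := List.mem_map.mp hpr
    obtain ⟨hvp, hvc⟩ := (mem_dcl p (i + 1) v).mp hv
    rw [← hveq]
    exact ⟨hvp, by rw [hvc]; push_cast; ring⟩
  · rintro ⟨hp, hc⟩
    have h1 : 1 ≤ p.count pr.1 := List.count_pos_iff.mpr hp
    have h2 : p.count pr.1 ≤ cntsMax p := count_le_cntsMax p pr.1 hp
    refine ⟨p.count pr.1 - 1, List.mem_range.mpr (by omega), ?_⟩
    refine List.mem_map.mpr ⟨pr.1, (mem_dcl p _ pr.1).mpr ⟨hp, by omega⟩, ?_⟩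
    have : ((p.count pr.1 - 1 : Nat) : Int) + 1 = (p.count pr.1 : Int) := by omega
    rw [this, ← hc]

theorem canonPairs_pairwise (p : List Int) :
    (canonPairs p).Pairwise (fun a b => a.2 < b.2 ∨ (a.2 = b.2 ∧ a.1 < b.1)) := by
  unfold canonPairs
  rw [List.flatMap_def, List.pairwise_flatten]
  constructor
  · intro l hl
    obtain ⟨i, _, hieq⟩ := List.mem_map.mp hl
    rw [← hieq]
    refine List.Pairwise.map _ ?_ (dcl_pairwise_lt p (i + 1))
    intro a b hab
    exact Or.inr ⟨rfl, hab⟩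
  · refine List.Pairwise.map _ ?_ List.pairwise_lt_range
    intro i j hij x hx y hy
    obtain ⟨v, _, hveq⟩ := List.mem_map.mp hx
    obtain ⟨w, _, hweq⟩ := List.mem_map.mp hy
    rw [← hveq, ← hweq]
    left; simp; omega

theorem canonPairs_nodup (p : List Int) : (canonPairs p).Nodup := by
  refine (canonPairs_pairwise p).imp ?_
  rintro ⟨a1, a2⟩ ⟨b1, b2⟩ h
  rcases h with h | ⟨h1, h2⟩ <;> simp_all <;> omega

theorem sorted2_eq_sorted_lex {α : Type} (xs : List α) (k1 k2 : α → Int) :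
    PySem.List.sorted2 xs k1 k2 false
      = PySem.List.sorted xs (fun a => toLex (k1 a, k2 a)) false := by
  unfold PySem.List.sorted2 PySem.List.sorted
  have hbf : (fun a b => decide (k1 a < k1 b) || (!decide (k1 b < k1 a) && decide (k2 a < k2 b)))
      = (fun a b => decide (toLex (k1 a, k2 a) < toLex (k1 b, k2 b))) := by
    funext a b
    rcases lt_trichotomy (k1 a) (k1 b) with h | h | h
    · simp [h, Prod.Lex.lt_iff]
    · simp [h, Prod.Lex.lt_iff]
    · simp [Prod.Lex.lt_iff, asymm h, h, ne_of_gt h]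
  simp only [Bool.false_eq_true, if_false, hbf]

theorem sorted2_runs_eq_canon (p : List Int) :
    PySem.List.sorted2 (pvRuns (PySem.List.sorted p (fun x => x) false))
      (fun pr => pr.2) (fun pr => pr.1) false = canonPairs p := by
  have hvp : (PySem.List.sorted p (fun x => x) false).Perm p := PySem.List.sorted_perm p _ false
  have hsp : (PySem.List.sorted p (fun x => x) false).Pairwise (fun a b => a ≤ b) := by
    simpa using PySem.List.sorted_pairwise p (fun x => x)
  obtain ⟨hrp, hrm⟩ := pvRuns_char _ hsp
  rw [sorted2_eq_sorted_lex]
  apply PySem.List.sorted_eq_of_perm_of_pairwise_lt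
  · rw [List.perm_ext_iff_of_nodup (canonPairs_nodup p)
      ((hrp.imp (fun hab => by intro he; rw [he] at hab; exact lt_irrefl _ hab)))]
    rintro ⟨a, b⟩
    rw [canonPairs_mem, hrm a b]
    simp only
    rw [hvp.mem_iff, hvp.count_eq a]
  · refine (canonPairs_pairwise p).imp ?_
    intro a b h
    rw [Prod.Lex.lt_iff]
    simpa using h

theorem rowNewB_char (row : List Int) :
    rowNewB row
      = (List.range (cntsMax (row.filter (fun x => x ≠ 0)))).flatMap
          (fun i => (dcl (row.filter (fun x => x ≠ 0)) (i + 1)).flatMap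
            (fun v => [v, (i : Int) + 1])) := by
  have hB : rowNewB row = List.flatMap (fun p : Int × Int => [p.1, p.2])
      (PySem.List.sorted2
        (pvRuns (PySem.List.sorted (List.filter (fun x => decide (x ≠ 0)) row) (fun x => x) false))
        (fun p => p.2) (fun p => p.1) false) := rfl
  rw [hB, sorted2_runs_eq_canon]
  unfold canonPairs
  rw [List.flatMap_assoc]
  congr 1
  funext i
  rw [List.flatMap_map]

theorem rowA_extract (p : List Int) (c2 : PySem.Dict Int (List Int))
    (h2 : c2.keys.Nodup)
    (h3 : ∀ c : Int, c2.contains c = true ↔ 1 ≤ c ∧ ∃ v ∈ p, c ≤ (p.count v : Int))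
    (h4 : ∀ c : Int, (c2.getD c []).Nodup)
    (h5 : ∀ c v : Int, v ∈ c2.getD c [] ↔ v ∈ p ∧ (p.count v : Int) = c) :
    (PySem.List.sorted c2.keys (fun x => x) false).foldl
      (fun new_row cnt =>
        (PySem.List.sorted (c2.getD cnt []) (fun x => x) false).foldl
          (fun nr ele => nr ++ [ele, cnt]) new_row) []
    = (List.range (cntsMax p)).flatMap
        (fun i => (dcl p (i + 1)).flatMap (fun v => [v, (i : Int) + 1])) := by
  have hinj : Function.Injective (fun i : Nat => ((i : Int) + 1)) := by
    intro i j h; simpa using h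
  have hkeys : PySem.List.sorted c2.keys (fun x => x) false
      = (List.range (cntsMax p)).map (fun i : Nat => ((i : Int) + 1)) := by
    apply PySem.List.sorted_eq_of_perm_of_pairwise_lt
    · rw [List.perm_ext_iff_of_nodup (List.nodup_range.map hinj) h2]
      intro k
      rw [← PySem.Dict.contains_iff_mem_keys, h3 k]
      simp only [List.mem_map, List.mem_range]
      constructor
      · rintro ⟨i, hi, hk⟩
        have hM : 1 ≤ cntsMax p := by omega
        obtain ⟨v, hv, hveq⟩ := cntsMax_mem p hM
        exact ⟨by omega, v, hv, by omega⟩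
      · rintro ⟨hk1, v, hv, hkv⟩
        have hle : p.count v ≤ cntsMax p := count_le_cntsMax p v hv
        exact ⟨k.toNat - 1, by omega, by omega⟩
    · refine List.Pairwise.map _ ?_ List.pairwise_lt_range
      intro i j hij
      omega
  rw [hkeys]
  have hbody : (fun (new_row : List Int) (cnt : Int) =>
        (PySem.List.sorted (c2.getD cnt []) (fun x => x) false).foldl
          (fun nr ele => nr ++ [ele, cnt]) new_row)
      = (fun acc cnt => acc ++ (PySem.List.sorted (c2.getD cnt []) (fun x => x) false).flatMap
          (fun ele => [ele, cnt])) := by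
    funext acc cnt
    exact PySem.List.foldl_append_eq_flatMap _ _ _
  rw [hbody, PySem.List.foldl_append_eq_flatMap, List.nil_append, List.flatMap_map]
  congr 1
  funext i
  have hsc : PySem.List.sorted (c2.getD ((i : Int) + 1) []) (fun x => x) false = dcl p (i + 1) := by
    apply PySem.List.sorted_eq_of_perm_of_pairwise_lt
    · rw [List.perm_ext_iff_of_nodup ((dcl_pairwise_lt p (i + 1)).imp ne_of_lt) (h4 _)]
      intro v
      rw [mem_dcl, h5]
      constructor
      · rintro ⟨hv, hc⟩; exact ⟨hv, by omega⟩
      · rintro ⟨hv, hc⟩; exact ⟨hv, by omega⟩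
    · exact dcl_pairwise_lt p (i + 1)
  rw [hsc]

theorem rowA_eq_rowB (row : List Int) : rowNewA row = rowNewB row := by
  have hfold : row.foldl
      (fun (st : PySem.Dict Int Int × PySem.Dict Int (List Int)) ele =>
        if ele = 0 then st
        else
          let i2 := if st.1.contains ele then st.1.insert ele (st.1.getD ele 0 + 1)
                    else st.1.insert ele 1
          let c := i2.getD ele 0
          let c2 := if st.2.contains c then st.2.insert c (st.2.getD c [] ++ [ele])
                    else st.2.insert c [ele]
          let c2 := if c > 1 then
              let prev := c2.getD (c - 1) []
              c2.insert (c - 1) ((PySem.List.remove? prev ele).getD prev)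
            else c2
          (i2, c2))
      (PySem.Dict.empty, PySem.Dict.empty)
      = (row.filter (fun x => x ≠ 0)).foldl stepA (PySem.Dict.empty, PySem.Dict.empty) := by
    rw [List.foldl_filter]
    apply PySem.List.foldl_congr_mem
    intro st x _
    by_cases hx : x = 0
    · simp [hx]
    · simp [hx, stepA]
  have hinv := invA_foldl (row.filter (fun x => x ≠ 0)) []
    (PySem.Dict.empty, PySem.Dict.empty) invA_empty
  rw [List.nil_append] at hinv
  obtain ⟨_, h2, h3, h4, h5⟩ := hinv
  unfold rowNewA
  rw [hfold, rowNewB_char]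
  exact rowA_extract _ _ h2 h3 h4 h5

theorem pad_eq (k : Int) :
    (PySem.List.pyRange 0 k 1).map (fun _ => (0 : Int)) = PySem.List.pyRepeat [(0 : Int)] k := by
  rw [PySem.List.pyRepeat_singleton]
  have hlen : (PySem.List.pyRange 0 k 1).length = k.toNat := by
    simp [PySem.List.pyRange]
    omega
  rw [List.map_const', hlen]

theorem width_eq (rows : List (List Int)) :
    rows.foldl (fun m row => if PySem.List.len row > m then PySem.List.len row else m) 0
      = PySem.List.maxD (rows.map (fun r => PySem.List.len r)) (fun x => x) 0 := by
  have h1 : rows.foldl (fun m row => if PySem.List.len row > m then PySem.List.len row else m) 0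
      = (rows.map (fun r => PySem.List.len r)).foldl max 0 := by
    rw [List.foldl_map]
    apply PySem.List.foldl_congr_mem
    intro m row _
    exact (max_def_lt m (PySem.List.len row)).symm
  rw [h1]
  cases h : rows.map (fun r => PySem.List.len r) with
  | nil =>
      have h0 : PySem.List.max? ([] : List Int) (fun x : Int => x) = none := by
        rw [PySem.List.max?_eq_none_iff]
      rw [PySem.List.maxD, h0]
      simp
  | cons x t =>
      have hx : 0 ≤ x := by
        have : x ∈ rows.map (fun r => PySem.List.len r) := by rw [h]; simp
        obtain ⟨r, _, hr⟩ := List.mem_map.mp this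
        rw [← hr, PySem.List.len_eq]
        positivity
      rw [PySem.List.maxD, PySem.List.max?_id_cons, Option.getD_some, List.foldl_cons,
        max_eq_right hx]

theorem assemble (rows : List (List Int)) :
    rows.map (fun row => row ++ (PySem.List.pyRange 0
        (rows.foldl (fun m row => if PySem.List.len row > m then PySem.List.len row else m) 0
          - PySem.List.len row) 1).map (fun _ => (0 : Int)))
    = rows.map (fun r => r ++ PySem.List.pyRepeat [(0 : Int)]
        (PySem.List.maxD (rows.map (fun r => PySem.List.len r)) (fun x => x) 0
          - PySem.List.len r)) := by
  rw [width_eq]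
  apply List.map_congr_left
  intro r _
  rw [pad_eq]

-- ===== VERDICT (by name: the statement is the Claim_ definition above) =====
theorem r_op_spec : Claim_equal_r_op := by
  unfold Claim_equal_r_op Spec_r_op
  intro matrix _
  have hfm : matrix.foldl (fun nm row => nm ++ [rowNewA row]) [] = matrix.map rowNewA := by
    simpa using PySem.List.foldl_append_singleton_eq_map rowNewA matrix []
  have hmapeq : matrix.map rowNewA = matrix.map rowNewB :=
    List.map_congr_left (fun r _ => rowA_eq_rowB r)
  have hA : r_op matrix = (matrix.foldl (fun nm row => nm ++ [rowNewA row]) []).map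
      (fun row => row ++ (PySem.List.pyRange 0
        ((matrix.foldl (fun nm row => nm ++ [rowNewA row]) []).foldl
          (fun m row => if PySem.List.len row > m then PySem.List.len row else m) 0
          - PySem.List.len row) 1).map (fun _ => (0 : Int))) := rfl
  have hB : r_op_alt matrix = (matrix.map rowNewB).map
      (fun r => r ++ PySem.List.pyRepeat [(0 : Int)]
        (PySem.List.maxD ((matrix.map rowNewB).map (fun r => PySem.List.len r)) (fun x => x) 0
          - PySem.List.len r)) := rfl
  rw [hA, hB, hfm, hmapeq]
  exact assemble (matrix.map rowNewB)
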